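-- pv_equiv track=rewrite | github.com/programist515-boop/stilist24 | ai-stylist-starter/app/services/today_service.py | _outfit_season_set
-- ===== SOURCE A (Python) =====
-- def _outfit_season_set(outfit: dict) -> set[str] | None:
--     """Intersection of explicit, non-all-season tags across items.
--
--     Returns ``None`` when the outfit has no explicit season information
--     on any item (the soft filter leaves those alone).
--     """
--     tagged_sets: list[set[str]] = []
--     any_all_season = False
--     for it in outfit.get("items", []):
--         tags = it.get("season") or []
--         if not tags:
--             continue
--         if "all_season" in tags:
--             any_all_season = True
--             continue
--         tagged_sets.append(set(tags))
--     if any_all_season: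
--         return None
--     if not tagged_sets:
--         return None
--     return set.intersection(*tagged_sets) if tagged_sets else None
-- ===== SOURCE B (Python) =====
-- def _outfit_season_set(outfit: dict) -> set[str] | None:
--     """Counting re-implementation: tally, per tag, how many tagged items
--     mention it; the intersection is exactly the tags hit by every tagged
--     item, so no per-item sets are kept and no intersection is computed."""
--     counts: dict[str, int] = {}
--     tagged = 0
--     for it in outfit.get("items", []):
--         tags = it.get("season") or []
--         if not tags:
--             continue
--         if "all_season" in tags:
--             return None
--         tagged += 1
--         for t in set(tags):
--             counts[t] = counts.get(t, 0) + 1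
--     if not tagged:
--         return None
--     return {t for t, c in counts.items() if c == tagged}
-- ===== Notes on version B (the rewrite author's own statement) =====
-- stated objective: alternative
-- what changed: Replaces collect-per-item-sets-then-variadic-intersection with a single-pass counting algorithm: a tag-frequency dict plus a tagged-item counter (early return on 'all_season'); the result is the tags whose count equals the number of tagged items, so no intermediate sets and no set intersection exist.
import Mathlib
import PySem

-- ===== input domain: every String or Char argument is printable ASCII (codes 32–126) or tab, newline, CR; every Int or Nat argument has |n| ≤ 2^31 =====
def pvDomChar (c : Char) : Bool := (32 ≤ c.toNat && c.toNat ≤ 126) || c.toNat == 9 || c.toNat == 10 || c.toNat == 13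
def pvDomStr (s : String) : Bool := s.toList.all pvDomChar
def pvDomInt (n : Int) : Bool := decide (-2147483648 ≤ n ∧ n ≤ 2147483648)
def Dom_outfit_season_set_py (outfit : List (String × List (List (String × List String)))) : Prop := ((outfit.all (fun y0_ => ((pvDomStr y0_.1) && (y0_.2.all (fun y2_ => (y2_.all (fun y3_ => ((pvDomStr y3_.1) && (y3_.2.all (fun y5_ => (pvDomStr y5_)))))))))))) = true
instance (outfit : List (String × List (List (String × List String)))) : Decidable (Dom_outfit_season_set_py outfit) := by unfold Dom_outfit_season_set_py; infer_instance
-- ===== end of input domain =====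

-- B replaces A's collect-per-item-sets-then-intersect with a counting algorithm (tag-frequency
-- dict + tagged-item counter, early return on 'all_season'); alternative, same cost.

-- ===== PORT A =====
def outfit_season_set_py (outfit : List (String × List (List (String × List String)))) : Option (List String) :=
  let items := (PySem.Dict.mk outfit).getD "items" []
  let st := items.foldl
    (fun (st : List (PySem.Set String) × Bool) it =>
      let tags := (PySem.Dict.mk it).getD "season" []
      if tags = [] then st
      else if tags.contains "all_season" then (st.1, true)
      else (st.1 ++ [PySem.Set.ofList tags], st.2))
    ([], false)
  if st.2 then none
  else if st.1 = [] then none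
  else match st.1 with
       | [] => none
       | s :: rest => some (rest.foldl PySem.Set.inter s)

-- ===== PORT B =====
-- the loop of Source B: counts dict + tagged counter, early 'return None' on 'all_season'
def pvAltLoop : List (List (String × List String)) → PySem.Dict String Int → Int →
    Option (PySem.Dict String Int × Int)
  | [], counts, tagged => some (counts, tagged)
  | it :: rest, counts, tagged =>
    let tags := (PySem.Dict.mk it).getD "season" []
    if tags = [] then pvAltLoop rest counts tagged
    else if tags.contains "all_season" then none
    else pvAltLoop rest
      ((PySem.Set.ofList tags).foldl (fun d t => d.modify t 0 (· + 1)) counts)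
      (tagged + 1)

def outfit_season_set_py_alt (outfit : List (String × List (List (String × List String)))) : Option (List String) :=
  match pvAltLoop ((PySem.Dict.mk outfit).getD "items" []) PySem.Dict.empty 0 with
  | none => none
  | some (counts, tagged) =>
    if tagged = 0 then none
    else some (PySem.Set.ofList
      ((counts.items.filter (fun p => p.2 == tagged)).map (fun p => p.1)))

-- ===== PRECONDITION & SPEC =====
def Spec_outfit_season_set_py (outfit : List (String × List (List (String × List String)))) (out : Option (List String)) : Prop := out = outfit_season_set_py_alt outfit
instance (outfit : List (String × List (List (String × List String)))) (out : Option (List String)) : Decidable (Spec_outfit_season_set_py outfit out) := by unfold Spec_outfit_season_set_py; infer_instance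

-- ===== CLAIM (what is proved, stated in full; the proofs are below) =====
def Claim_equal_outfit_season_set_py : Prop := ∀ (outfit : List (String × List (List (String × List String)))), Dom_outfit_season_set_py outfit → Spec_outfit_season_set_py outfit (outfit_season_set_py outfit)

-- ===== LEMMAS AND PROOFS =====

-- the season tags of one item
def pvT (it : List (String × List String)) : List String := (PySem.Dict.mk it).getD "season" []

-- the nonempty season lists, in item order
def pvTsl (items : List (List (String × List String))) : List (List String) :=
  (items.map pvT).filter (fun ts => !ts.isEmpty)

-- one counting step of Source B's inner loop
def pvBump (d : PySem.Dict String Int) (tags : List String) : PySem.Dict String Int :=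
  (PySem.Set.ofList tags).foldl (fun d t => d.modify t 0 (· + 1)) d

-- foldl of || is any
theorem pv_foldl_or {α : Type} (l : List α) (q : α → Bool) (b : Bool) :
    l.foldl (fun acc x => acc || q x) b = (b || l.any q) := by
  induction l generalizing b with
  | nil => simp
  | cons x xs ih => simp [ih, Bool.or_assoc]

-- intersection fold = filter by membership in all
theorem pv_foldl_inter (rest : List (List String)) (s : List String) :
    (rest.map PySem.Set.ofList).foldl PySem.Set.inter s
      = s.filter (fun x => rest.all (fun ts => ts.contains x)) := by
  induction rest generalizing s with
  | nil => simp
  | cons ts rest ih =>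
    simp only [List.map_cons, List.foldl_cons, ih, PySem.Set.inter, List.filter_filter]
    exact List.filter_congr (fun x _ => by simp [List.all_cons, Bool.and_comm])

-- A's value: none if any item is tagged all-season, else the intersection of the tag sets
theorem pv_A_char (outfit : List (String × List (List (String × List String)))) :
    outfit_season_set_py outfit
      = if ((PySem.Dict.mk outfit).getD "items" []).any
            (fun it => (pvT it).contains "all_season") then none
        else match pvTsl ((PySem.Dict.mk outfit).getD "items" []) with
        | [] => none
        | head :: rest => some ((PySem.Set.ofList head).filter
            (fun x => rest.all (fun ts => ts.contains x))) := by
  have hTfold : ∀ it : List (String × List String),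
      (PySem.Dict.mk it).getD "season" [] = pvT it := fun _ => rfl
  unfold outfit_season_set_py pvTsl
  simp only [hTfold]
  set items := (PySem.Dict.mk outfit).getD "items" [] with hitems
  -- split the pair-state foldl into two independent foldls
  have hbody :
      (fun (st : List (PySem.Set String) × Bool) it =>
        if pvT it = [] then st
        else if (pvT it).contains "all_season" then (st.1, true)
        else (st.1 ++ [PySem.Set.ofList (pvT it)], st.2))
      = fun (st : List (PySem.Set String) × Bool) it =>
        ((if pvT it = [] then st.1 else if (pvT it).contains "all_season" then st.1
            else st.1 ++ [PySem.Set.ofList (pvT it)]),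
         (if pvT it = [] then st.2 else if (pvT it).contains "all_season" then true else st.2)) := by
    funext st it; split_ifs <;> rfl
  have hsplit := PySem.List.foldl_prod_mk
    (f := fun acc it => if pvT it = [] then acc
      else if (pvT it).contains "all_season" then acc else acc ++ [PySem.Set.ofList (pvT it)])
    (g := fun acc it => if pvT it = [] then acc
      else if (pvT it).contains "all_season" then true else acc)
    (l := items) (a := ([] : List (PySem.Set String))) (b := false)
  beta_reduce at hsplit
  rw [hbody]
  simp only [hsplit]
  -- the flag component is an any()
  have hflag : items.foldl
      (fun acc it => if pvT it = [] then acc else if (pvT it).contains "all_season" then true else acc)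
      false = items.any (fun it => (pvT it).contains "all_season") := by
    have hg : (fun (acc : Bool) it =>
        if pvT it = [] then acc else if (pvT it).contains "all_season" then true else acc)
        = fun acc it => acc || (pvT it).contains "all_season" := by
      funext acc it
      by_cases h0 : pvT it = []
      · simp [h0]
      · split_ifs <;> simp_all
    rw [hg, pv_foldl_or]; simp
  rw [hflag]
  by_cases hall : items.any (fun it => (pvT it).contains "all_season") = true
  · rw [if_pos hall, if_pos hall]
  · have hflagf : items.any (fun it => (pvT it).contains "all_season") = false :=
      Bool.eq_false_iff.mpr (by simpa using hall)
    have hnoall : ∀ it ∈ items, (pvT it).contains "all_season" = false := by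
      intro it hit
      have := List.any_eq_false.mp hflagf it hit
      simpa using this
    -- the list component collects set(tags) of the nonempty season lists
    have hlist : items.foldl
        (fun acc it => if pvT it = [] then acc
          else if (pvT it).contains "all_season" then acc else acc ++ [PySem.Set.ofList (pvT it)])
        [] = (items.filter (fun it => !(pvT it).isEmpty)).map (fun it => PySem.Set.ofList (pvT it)) := by
      rw [PySem.List.foldl_congr_mem items _
        (fun acc it => if !(pvT it).isEmpty then acc ++ [PySem.Set.ofList (pvT it)] else acc) []
        (by
          intro acc it hit
          have hna := hnoall it hit
          simp only [Bool.eq_false_iff] at hna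
          by_cases h0 : pvT it = []
          · simp [h0]
          · simp [h0]
            exact fun hm => hna (by simpa using hm))]
      exact PySem.List.foldl_append_if _ _ _ _
    have hfilt : (items.map pvT).filter (fun tags => !tags.isEmpty)
        = (items.filter (fun it => !(pvT it).isEmpty)).map pvT := by
      rw [List.filter_map]; rfl
    simp only [hflagf, Bool.false_eq_true, if_false, hlist, hfilt]
    set F := items.filter (fun it => !(pvT it).isEmpty) with hF
    have hmap : F.map (fun it => PySem.Set.ofList (pvT it)) = (F.map pvT).map PySem.Set.ofList := by
      simp [List.map_map, Function.comp]
    rw [hmap]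
    cases hFT : F.map pvT with
    | nil => simp
    | cons head rest =>
      simp only [List.map_cons, reduceCtorEq, if_false, pv_foldl_inter]

-- B's loop, characterized
theorem pv_loop_char (l : List (List (String × List String))) (d : PySem.Dict String Int) (n : Int) :
    pvAltLoop l d n
      = if l.any (fun it => (pvT it).contains "all_season") then none
        else some ((pvTsl l).foldl pvBump d, n + (pvTsl l).length) := by
  induction l generalizing d n with
  | nil => simp [pvAltLoop, pvTsl]
  | cons it rest ih =>
    show (if pvT it = [] then pvAltLoop rest d n
          else if (pvT it).contains "all_season" then none
          else pvAltLoop rest (pvBump d (pvT it)) (n + 1)) = _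
    by_cases h0 : pvT it = []
    · rw [if_pos h0, ih]
      have : pvTsl (it :: rest) = pvTsl rest := by
        simp [pvTsl, h0]
      rw [this]
      have : (it :: rest).any (fun it => (pvT it).contains "all_season")
          = rest.any (fun it => (pvT it).contains "all_season") := by
        simp [h0]
      rw [this]
    · rw [if_neg h0]
      have htsl : pvTsl (it :: rest) = pvT it :: pvTsl rest := by
        simp only [pvTsl, List.map_cons]
        rw [List.filter_cons_of_pos (by simpa using h0)]
      by_cases hc : (pvT it).contains "all_season"
      · rw [if_pos hc, if_pos (show ((it :: rest).any fun it => (pvT it).contains "all_season") = true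
          by simp only [List.any_cons, hc, Bool.true_or])]
      · rw [if_neg (by simpa using hc), ih, htsl]
        simp only [List.any_cons, hc, Bool.false_or, List.foldl_cons, List.length_cons]
        split_ifs with h
        · rfl
        · congr 2; push_cast; ring

-- count in a deduplicated list is membership
theorem pv_count_ofList (ts : List String) (t : String) :
    (PySem.Set.ofList ts).count t = if ts.contains t then 1 else 0 := by
  by_cases hm : t ∈ ts
  · rw [if_pos (by simpa using hm)]
    exact List.count_eq_one_of_mem (PySem.Set.nodup_ofList ts)
      ((PySem.Set.mem_ofList ts t).mpr hm)
  · rw [if_neg (by simpa using hm)]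
    exact List.count_eq_zero.mpr (fun hc => hm ((PySem.Set.mem_ofList ts t).mp hc))

-- each counter value is the number of tag lists containing the key
theorem pv_getD_fold (tsl : List (List String)) (d : PySem.Dict String Int) (t : String) :
    (tsl.foldl pvBump d).getD t 0
      = d.getD t 0 + (tsl.countP (fun ts => ts.contains t) : Int) := by
  induction tsl generalizing d with
  | nil => simp
  | cons ts tsl ih =>
    rw [List.foldl_cons, ih]
    show (pvBump d ts).getD t 0 + _ = _
    rw [pvBump, PySem.Dict.getD_foldl_modify_add_one, pv_count_ofList, List.countP_cons]
    split_ifs with hm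
    · simp; push_cast; ring
    · simp

-- updating a set does not change a filter whose predicate only holds inside the set
theorem pv_filter_update (ys : List String) (s : PySem.Set String) (P : String → Bool)
    (h : ∀ y, P y = true → y ∈ s) :
    (s.update ys).filter P = s.filter P := by
  induction ys generalizing s with
  | nil => rfl
  | cons y ys ih =>
    show ((s.add y).update ys).filter P = _
    by_cases hm : y ∈ s
    · rw [PySem.Set.add_of_mem hm]; exact ih s h
    · rw [PySem.Set.add_of_not_mem hm, ih (s ++ [y])
        (fun z hz => List.mem_append_left _ (h z hz)),
        List.filter_append]
      have : P y = false := by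
        cases hP : P y with
        | false => rfl
        | true => exact absurd (h y hP) hm
      simp [this]

-- set-add keeps Nodup through an update
theorem pv_nodup_update (ys : List String) (s : PySem.Set String) (h : s.Nodup) :
    (s.update ys).Nodup := by
  induction ys generalizing s with
  | nil => exact h
  | cons y ys ih => exact ih (s.add y) (PySem.Set.nodup_add s y h)

-- folding more tag lists neither disturbs such a filter of the keys nor their Nodup
theorem pv_keys_fold (tsl : List (List String)) (d : PySem.Dict String Int) (P : String → Bool)
    (hnd : d.keys.Nodup) (h : ∀ y, P y = true → y ∈ d.keys) :
    ((tsl.foldl pvBump d).keys.filter P = d.keys.filter P)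
      ∧ (tsl.foldl pvBump d).keys.Nodup := by
  induction tsl generalizing d with
  | nil => exact ⟨rfl, hnd⟩
  | cons ts tsl ih =>
    have hk : (pvBump d ts).keys = PySem.Set.update d.keys (PySem.Set.ofList ts) := by
      rw [pvBump]
      exact PySem.Dict.keys_foldl_modify (PySem.Set.ofList ts) 0 (fun _ _ v => v + 1) d
    have hnd' : (pvBump d ts).keys.Nodup := by rw [hk]; exact pv_nodup_update _ _ hnd
    have hmem : ∀ y, P y = true → y ∈ (pvBump d ts).keys := by
      intro y hy; rw [hk]
      exact (PySem.Set.mem_update _ _ y).mpr (Or.inl (h y hy))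
    obtain ⟨h1, h2⟩ := ih (pvBump d ts) hnd' hmem
    refine ⟨?_, h2⟩
    rw [List.foldl_cons] at *
    rw [h1, hk, pv_filter_update _ _ _ h]

-- ===== VERDICT (by name: the statement is the Claim_ definition above) =====
-- Source B's final set comprehension over the counter, reduced to a filter of the keys
theorem pv_B_result (head : List String) (rest : List (List String)) :
    PySem.Set.ofList (((((head :: rest).foldl pvBump PySem.Dict.empty).items).filter
        (fun p => p.2 == (0 + ((head :: rest).length : Int)))).map (fun p => p.1))
      = (PySem.Set.ofList head).filter (fun x => rest.all (fun ts => ts.contains x)) := by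
  set n : Int := 0 + ((head :: rest).length : Int) with hn
  set d := (head :: rest).foldl pvBump PySem.Dict.empty with hd
  set P : String → Bool := fun k => head.contains k && rest.all (fun ts => ts.contains k) with hP
  -- the keys of the dict after the first bump are set(head)
  have hk1 : (pvBump PySem.Dict.empty head).keys = PySem.Set.ofList head := by
    rw [pvBump, PySem.Dict.keys_foldl_modify (PySem.Set.ofList head) 0 (fun _ _ v => v + 1)
      PySem.Dict.empty]
    show PySem.Set.update [] (PySem.Set.ofList head) = _
    show List.foldl PySem.Set.add [] (PySem.Set.ofList head) = _
    rw [← PySem.Set.ofList_eq_foldl]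
    exact PySem.Set.ofList_eq_self_of_nodup _ (PySem.Set.nodup_ofList head)
  have hnd1 : (pvBump PySem.Dict.empty head).keys.Nodup := by
    rw [hk1]; exact PySem.Set.nodup_ofList head
  have hmem1 : ∀ y, P y = true → y ∈ (pvBump PySem.Dict.empty head).keys := by
    intro y hy; rw [hk1]
    refine (PySem.Set.mem_ofList head y).mpr ?_
    have := (Bool.and_eq_true ..).mp hy
    simpa using this.1
  have hkeys := pv_keys_fold rest (pvBump PySem.Dict.empty head) P hnd1 hmem1
  have hdk : d.keys.filter P = (PySem.Set.ofList head).filter P := by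
    rw [hd, List.foldl_cons]; rw [hkeys.1, hk1]
  have hdnd : d.keys.Nodup := by rw [hd, List.foldl_cons]; exact hkeys.2
  -- each value is the number of tag lists containing the key
  have hval : ∀ k, d.getD k 0 = ((head :: rest).countP (fun ts => ts.contains k) : Int) := by
    intro k
    rw [hd, pv_getD_fold, PySem.Dict.getD_empty, zero_add]
  -- the count equals the number of lists exactly when every list contains the key
  have hPQ : (fun k => d.getD k 0 == n) = P := by
    funext k
    rw [hval k, hn, hP, zero_add]
    beta_reduce
    have hle : (head :: rest).countP (fun ts => ts.contains k) ≤ (head :: rest).length :=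
      List.countP_le_length
    by_cases hq : head.contains k = true ∧ rest.all (fun ts => ts.contains k) = true
    · have : (head :: rest).countP (fun ts => ts.contains k) = (head :: rest).length := by
        refine List.countP_eq_length.mpr ?_
        intro ts hts
        rcases List.mem_cons.mp hts with h | h
        · subst h; exact hq.1
        · exact List.all_eq_true.mp hq.2 ts h
      rw [this, hq.1, hq.2]
      simp only [beq_self_eq_true, Bool.and_self]
    · have hne : (head :: rest).countP (fun ts => ts.contains k) ≠ (head :: rest).length := by
        intro he
        apply hq
        have := List.countP_eq_length.mp he
        exact ⟨this head List.mem_cons_self, List.all_eq_true.mpr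
          (fun ts hts => this ts (List.mem_cons_of_mem _ hts))⟩
      have h1 : ((((head :: rest).countP (fun ts => ts.contains k) : Nat) : Int)
          == (((head :: rest).length : Nat) : Int)) = false :=
        beq_eq_false_iff_ne.mpr (by exact_mod_cast hne)
      have h2 : (head.contains k && rest.all (fun ts => ts.contains k)) = false := by
        cases hq1 : head.contains k <;> cases hq2 : rest.all (fun ts => ts.contains k) <;>
          simp_all
      rw [h1, h2]
  -- dict items as keys, then the comprehension as a key filter
  rw [PySem.Dict.items_eq_map_keys d hdnd 0, List.filter_map]
  have : ((fun p => p.2 == n) ∘ fun k => (k, d.getD k 0)) = fun k => d.getD k 0 == n := rfl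
  rw [this, List.map_map]
  have : ((fun p => p.1) ∘ fun k => (k, d.getD k 0)) = id := rfl
  rw [this, List.map_id, hPQ, hdk]
  rw [PySem.Set.ofList_eq_self_of_nodup _ ((PySem.Set.nodup_ofList head).filter P)]
  exact List.filter_congr (fun x hx => by
    have hcx : head.contains x = true := by
      simpa using (PySem.Set.mem_ofList head x).mp hx
    rw [hP]; beta_reduce; rw [hcx, Bool.true_and])

theorem outfit_season_set_py_spec : Claim_equal_outfit_season_set_py := by
  intro outfit _
  unfold Spec_outfit_season_set_py outfit_season_set_py_alt
  rw [pv_A_char, pv_loop_char]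
  by_cases hall : ((PySem.Dict.mk outfit).getD "items" []).any
      (fun it => (pvT it).contains "all_season") = true
  · rw [if_pos hall, if_pos hall]
  · rw [if_neg hall, if_neg hall]
    cases htsl : pvTsl ((PySem.Dict.mk outfit).getD "items" []) with
    | nil => simp
    | cons head rest =>
      have hne : ¬ ((0 + (((head :: rest).length : Nat) : Int)) = 0) := by
        push_cast [List.length_cons]; omega
      show some _ = if (0 + (((head :: rest).length : Nat) : Int)) = 0 then none else _
      rw [if_neg hne]
      exact congrArg some (pv_B_result head rest).symm
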